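-- pv_equiv track=rewrite | github.com/cgnl/mulle.js | build_scripts/extract_boat_parts.py | split_lingo_items
-- ===== SOURCE A (Python) =====
-- def split_lingo_items(content):
--     """
--     Split a Lingo list by commas, respecting nested brackets.
--     """
--     items = []
--     current = ""
--     bracket_count = 0
--
--     for c in content:
--         if c == '[':
--             bracket_count += 1
--             current += c
--         elif c == ']':
--             bracket_count -= 1
--             current += c
--         elif c == ',' and bracket_count == 0:
--             if current.strip():
--                 items.append(current.strip())
--             current = ""
--         else:
--             current += c
--
--     if current.strip():
--         items.append(current.strip())
--
--     return items
-- ===== SOURCE B (Python) =====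
-- def split_lingo_items(content):
--     """
--     Split a Lingo list by commas, respecting nested brackets.
--
--     Two passes: first find the positions of all top-level commas,
--     then slice the string at those positions, strip each piece and
--     keep the non-empty ones.
--     """
--     cuts = []
--     depth = 0
--     for i, c in enumerate(content):
--         if c == '[':
--             depth += 1
--         elif c == ']':
--             depth -= 1
--         elif c == ',' and depth == 0:
--             cuts.append(i)
--     items = []
--     prev = 0
--     for cut in cuts + [len(content)]:
--         piece = content[prev:cut].strip()
--         if piece:
--             items.append(piece)
--         prev = cut + 1
--     return items
-- ===== Notes on version B (the rewrite author's own statement) =====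
-- stated objective: alternative
-- what changed: Instead of building each item by per-character accumulation with inline strip-and-append at every top-level comma, B first records the positions of all top-level commas and then slices the string at those cut points, stripping each slice and keeping the non-empty ones.
import Mathlib
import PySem

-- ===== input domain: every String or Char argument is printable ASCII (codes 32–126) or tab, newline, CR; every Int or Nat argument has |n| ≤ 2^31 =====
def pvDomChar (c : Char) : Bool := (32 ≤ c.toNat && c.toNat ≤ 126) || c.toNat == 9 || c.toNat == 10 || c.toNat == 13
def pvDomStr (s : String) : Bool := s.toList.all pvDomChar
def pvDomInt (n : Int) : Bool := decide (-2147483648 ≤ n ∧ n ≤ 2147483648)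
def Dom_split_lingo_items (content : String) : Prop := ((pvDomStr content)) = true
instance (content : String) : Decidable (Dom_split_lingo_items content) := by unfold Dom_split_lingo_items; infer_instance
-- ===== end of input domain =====

-- B replaces A's per-character accumulation (with inline strip/append at each top-level comma)
-- by a two-pass decomposition: find top-level comma positions, then slice/strip/filter; alternative, same cost.


-- ===== PORT A =====
-- A's loop body: build `current` char by char, cut at top-level commas, strip-and-keep inline
def pvStepA (st : List String × List Char × Int) (c : Char) : List String × List Char × Int :=
  if c = '[' then (st.1, st.2.1 ++ [c], st.2.2 + 1)
  else if c = ']' then (st.1, st.2.1 ++ [c], st.2.2 - 1)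
  else if c = ',' ∧ st.2.2 = 0 then
    ((if PySem.Chars.strip st.2.1 ≠ [] then st.1 ++ [String.ofList (PySem.Chars.strip st.2.1)] else st.1), [], st.2.2)
  else (st.1, st.2.1 ++ [c], st.2.2)

def split_lingo_items (content : String) : List String :=
  let st := content.toList.foldl pvStepA ([], [], 0)
  st.1 ++ (if PySem.Chars.strip st.2.1 ≠ [] then [String.ofList (PySem.Chars.strip st.2.1)] else [])

-- ===== PORT B =====
-- B's first loop body: record indices of top-level commas
def pvStepB (st : Int × List Int) (p : Int × Char) : Int × List Int :=
  if p.2 = '[' then (st.1 + 1, st.2)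
  else if p.2 = ']' then (st.1 - 1, st.2)
  else if p.2 = ',' ∧ st.1 = 0 then (st.1, st.2 ++ [p.1])
  else st

-- B's second loop body: slice at the cut points, strip, keep non-empty
def pvStepFin (content : String) (st : List String × Int) (cut : Int) : List String × Int :=
  let piece := PySem.Str.strip (PySem.Str.slice content (some st.2) (some cut))
  ((if piece ≠ "" then st.1 ++ [piece] else st.1), cut + 1)

def split_lingo_items_alt (content : String) : List String :=
  let scan := (PySem.List.enumerate content.toList).foldl pvStepB (0, [])
  let fin := (scan.2 ++ [(content.toList.length : Int)]).foldl (pvStepFin content) ([], 0)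
  fin.1

-- ===== PRECONDITION & SPEC =====
def Spec_split_lingo_items (content : String) (out : List String) : Prop := out = split_lingo_items_alt content
instance (content : String) (out : List String) : Decidable (Spec_split_lingo_items content out) := by unfold Spec_split_lingo_items; infer_instance

-- ===== CLAIM (what is proved, stated in full; the proofs are below) =====
def Claim_equal_split_lingo_items : Prop := ∀ (content : String), Dom_split_lingo_items content → Spec_split_lingo_items content (split_lingo_items content)

-- ===== LEMMAS AND PROOFS =====

def pvDelta (c : Char) : Int := if c = '[' then 1 else if c = ']' then -1 else 0

-- the top-level-comma segments of l, with initial bracket depth bc (always non-empty)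
def pvSplitTop : List Char → Int → List (List Char)
  | [], _ => [[]]
  | c :: cs, bc =>
    if c = ',' ∧ bc = 0 then [] :: pvSplitTop cs bc
    else (pvSplitTop cs (bc + pvDelta c)).modifyHead (c :: ·)

def pvStripS (l : List Char) : String := String.ofList (PySem.Chars.strip l)

theorem pvModifyHead_nil {α : Type} (l : List (List α)) : l.modifyHead (fun h => [] ++ h) = l := by
  cases l <;> simp

theorem pvFoldA (cs : List Char) : ∀ (items : List String) (cur : List Char) (bc : Int),
    (let st := cs.foldl pvStepA (items, cur, bc)
     st.1 ++ (if PySem.Chars.strip st.2.1 ≠ [] then [String.ofList (PySem.Chars.strip st.2.1)] else []))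
    = items ++ ((((pvSplitTop cs bc).modifyHead (cur ++ ·)).map pvStripS).filter (fun s => s ≠ "")) := by
  induction cs with
  | nil =>
    intro items cur bc
    simp only [List.foldl_nil, pvSplitTop, List.modifyHead, List.map, List.filter, pvStripS]
    by_cases h : PySem.Chars.strip cur = [] <;> simp [h]
  | cons c cs ih =>
    intro items cur bc
    simp only [List.foldl_cons]
    by_cases h3 : c = ',' ∧ bc = 0
    · obtain ⟨hc, hbc⟩ := h3; subst hc; subst hbc
      have hstep : pvStepA (items, cur, 0) ',' =
          ((if PySem.Chars.strip cur ≠ [] then items ++ [String.ofList (PySem.Chars.strip cur)] else items), [], 0) := by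
        simp [pvStepA]
      rw [hstep, ih]
      have hsp : pvSplitTop (',' :: cs) 0 = [] :: pvSplitTop cs 0 := by
        rw [pvSplitTop, if_pos ⟨rfl, rfl⟩]
      rw [hsp]
      rcases pvSplitTop cs 0 with _ | ⟨hd, tl⟩ <;>
        · by_cases h : PySem.Chars.strip cur = [] <;>
            simp [h, List.modifyHead, pvStripS]
    · have hstep : pvStepA (items, cur, bc) c = (items, cur ++ [c], bc + pvDelta c) := by
        by_cases h1 : c = '['
        · subst h1; simp [pvStepA, pvDelta]
        · by_cases h2 : c = ']'
          · subst h2; simp [pvStepA, pvDelta]; omega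
          · simp [pvStepA, pvDelta, h1, h2, h3]
      rw [hstep, ih]
      have hsp : pvSplitTop (c :: cs) bc = (pvSplitTop cs (bc + pvDelta c)).modifyHead (c :: ·) := by
        rw [pvSplitTop, if_neg h3]
      rw [hsp]
      rcases pvSplitTop cs (bc + pvDelta c) with _ | ⟨hd, tl⟩
      · simp
      · simp [List.modifyHead]

def pvCutsRec : List Char → Int → Int → List Int
  | [], _, _ => []
  | c :: cs, i, depth =>
    if c = ',' ∧ depth = 0 then i :: pvCutsRec cs (i + 1) depth
    else pvCutsRec cs (i + 1) (depth + pvDelta c)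

theorem pvFoldB (cs : List Char) : ∀ (i depth : Int) (acc : List Int),
    ((PySem.List.enumerate cs i).foldl pvStepB (depth, acc)).2 = acc ++ pvCutsRec cs i depth := by
  induction cs with
  | nil => intro i depth acc; simp [PySem.List.enumerate, pvCutsRec]
  | cons c cs ih =>
    intro i depth acc
    rw [PySem.List.enumerate_cons, List.foldl_cons]
    by_cases h3 : c = ',' ∧ depth = 0
    · obtain ⟨hc, hd⟩ := h3; subst hc; subst hd
      have hstep : pvStepB (0, acc) (i, ',') = (0, acc ++ [i]) := by simp [pvStepB]
      rw [hstep, ih]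
      simp [pvCutsRec]
    · have hstep : pvStepB (depth, acc) (i, c) = (depth + pvDelta c, acc) := by
        by_cases h1 : c = '['
        · subst h1; simp [pvStepB, pvDelta]
        · by_cases h2 : c = ']'
          · subst h2; simp [pvStepB, pvDelta]; omega
          · simp [pvStepB, pvDelta, h1, h2, h3]
      rw [hstep, ih]
      have hsp : pvCutsRec (c :: cs) i depth = pvCutsRec cs (i + 1) (depth + pvDelta c) := by
        rw [pvCutsRec, if_neg h3]
      rw [hsp]

theorem pvCutsRec_ge (cs : List Char) : ∀ (i depth : Int), ∀ x ∈ pvCutsRec cs i depth, i ≤ x := by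
  induction cs with
  | nil => intro i depth x hx; simp [pvCutsRec] at hx
  | cons c cs ih =>
    intro i depth x hx
    simp only [pvCutsRec] at hx
    split at hx
    · rcases List.mem_cons.mp hx with rfl | hx
      · omega
      · have := ih (i + 1) depth x hx; omega
    · have := ih (i + 1) (depth + pvDelta c) x hx; omega

def pvSegsRec (cs : List Char) : Int → List Int → List (List Char)
  | _, [] => []
  | k, cut :: rest => PySem.List.slice cs (some k) (some cut) :: pvSegsRec cs (cut + 1) rest

theorem pvFoldFin (content : String) (cutlist : List Int) : ∀ (items : List String) (k : Int),
    ((cutlist.foldl (pvStepFin content) (items, k))).1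
    = items ++ ((pvSegsRec content.toList k cutlist).map pvStripS).filter (fun s => s ≠ "") := by
  induction cutlist with
  | nil => intro items k; simp [pvSegsRec]
  | cons cut rest ih =>
    intro items k
    rw [List.foldl_cons]
    have hp : PySem.Str.strip (PySem.Str.slice content (some k) (some cut))
        = pvStripS (PySem.List.slice content.toList (some k) (some cut)) := by
      have h2 := PySem.Str.toList_strip (PySem.Str.slice content (some k) (some cut))
      rw [PySem.Str.toList_slice] at h2
      calc PySem.Str.strip (PySem.Str.slice content (some k) (some cut))
          = String.ofList ((PySem.Str.strip (PySem.Str.slice content (some k) (some cut))).toList) :=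
            (String.ofList_toList).symm
        _ = _ := by rw [h2]; simp [pvStripS]
    show ((rest.foldl (pvStepFin content) (pvStepFin content (items, k) cut))).1 = _
    simp only [pvStepFin, hp]
    rw [ih]
    simp only [pvSegsRec, List.map, List.filter]
    by_cases h : pvStripS (PySem.List.slice content.toList (some k) (some cut)) = "" <;>
      simp [h]

theorem pvSliceHead (cs : List Char) (k cut : Int) (c : Char) (cs' : List Char)
    (hk : 0 ≤ k) (hcut : k + 1 ≤ cut) (hdrop : cs.drop k.toNat = c :: cs') :
    PySem.List.slice cs (some k) (some cut) = c :: PySem.List.slice cs (some (k + 1)) (some cut) := by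
  rw [PySem.List.slice_toNat cs hk (by omega : (0:Int) ≤ cut), PySem.List.slice_toNat cs (by omega : (0:Int) ≤ k + 1) (by omega : (0:Int) ≤ cut)]
  have hdrop' : cs.drop (k + 1).toNat = cs' := by
    have h1 : (k + 1).toNat = k.toNat + 1 := by omega
    rw [h1, ← List.drop_drop, hdrop]
    simp
  rw [hdrop, hdrop']
  have h2 : cut.toNat - k.toNat = (cut.toNat - (k + 1).toNat) + 1 := by omega
  rw [h2]
  simp

theorem pvSegsMain (l : List Char) : ∀ (cs : List Char) (k bc : Int), 0 ≤ k → cs.drop k.toNat = l →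
    pvSegsRec cs k (pvCutsRec l k bc ++ [(cs.length : Int)]) = pvSplitTop l bc := by
  induction l with
  | nil =>
    intro cs k bc hk hdrop
    simp only [pvCutsRec, List.nil_append, pvSegsRec, pvSplitTop]
    rw [PySem.List.slice_toNat cs hk (by positivity : (0:Int) ≤ (cs.length : Int))]
    rw [hdrop]
    simp
  | cons c cs' ih =>
    intro cs k bc hk hdrop
    have hklt : k.toNat < cs.length := by
      by_contra h
      rw [List.drop_eq_nil_of_le (by omega)] at hdrop
      simp at hdrop
    have hdrop' : cs.drop (k + 1).toNat = cs' := by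
      have h1 : (k + 1).toNat = k.toNat + 1 := by omega
      rw [h1, ← List.drop_drop, hdrop]
      simp
    by_cases h3 : c = ',' ∧ bc = 0
    · have hcu : pvCutsRec (c :: cs') k bc = k :: pvCutsRec cs' (k + 1) bc := by
        rw [pvCutsRec, if_pos h3]
      rw [hcu]
      have hsp : pvSplitTop (c :: cs') bc = [] :: pvSplitTop cs' bc := by
        rw [pvSplitTop, if_pos h3]
      rw [hsp]
      simp only [List.cons_append, pvSegsRec]
      rw [ih cs (k + 1) bc (by omega) hdrop', PySem.List.slice_toNat cs hk hk]
      simp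
    · have hcu : pvCutsRec (c :: cs') k bc = pvCutsRec cs' (k + 1) (bc + pvDelta c) := by
        rw [pvCutsRec, if_neg h3]
      have hsp : pvSplitTop (c :: cs') bc = (pvSplitTop cs' (bc + pvDelta c)).modifyHead (c :: ·) := by
        rw [pvSplitTop, if_neg h3]
      rw [hcu, hsp, ← ih cs (k + 1) (bc + pvDelta c) (by omega) hdrop']
      rcases hrest : pvCutsRec cs' (k + 1) (bc + pvDelta c) ++ [(cs.length : Int)] with _ | ⟨cut, tail⟩
      · exact absurd hrest (by simp)
      · have hcut : k + 1 ≤ cut := by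
          have hmem : cut ∈ pvCutsRec cs' (k + 1) (bc + pvDelta c) ++ [(cs.length : Int)] := by
            rw [hrest]; exact List.mem_cons_self
          rcases List.mem_append.mp hmem with hin | hin
          · exact pvCutsRec_ge cs' (k + 1) (bc + pvDelta c) cut hin
          · have : cut = (cs.length : Int) := by simpa using hin
            omega
        simp only [pvSegsRec]
        rw [pvSliceHead cs k cut c cs' hk hcut hdrop]
        simp [List.modifyHead]

-- ===== VERDICT (by name: the statement is the Claim_ definition above) =====
theorem split_lingo_items_spec : Claim_equal_split_lingo_items := by
  intro content _
  unfold Spec_split_lingo_items split_lingo_items split_lingo_items_alt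
  have hA := pvFoldA content.toList [] [] 0
  rw [pvModifyHead_nil] at hA
  simp only [] at hA ⊢
  rw [hA]
  have hB := pvFoldB content.toList 0 0 []
  have hFin := pvFoldFin content (pvCutsRec content.toList 0 0 ++ [(content.toList.length : Int)]) [] 0
  simp only [List.nil_append] at hFin hB ⊢
  rw [hB]
  rw [hFin]
  rw [pvSegsMain content.toList content.toList 0 0 le_rfl (by simp)]
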